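-- pv_equiv track=rewrite | github.com/sagieinav/obsidian-cs-knowledge-base | 20 Education/23 Semester 1/23.01 Computer Science Intro/3 Tasks/3.11 Recursions.py | has_switched_couple
-- ===== SOURCE A (Python) =====
-- def has_switched_couple(number):
-- 	if number < 10:
-- 		return False
--
-- 	dig0 = number % 10
-- 	dig1 = number // 10 % 10
--
-- 	if (dig0 % 2 == 0 and dig1 % 2 != 0) or (dig0 % 2 != 0 and dig1 % 2 == 0):
-- 		return True
--
-- 	return has_switched_couple(number // 10)
-- ===== SOURCE B (Python) =====
-- def has_switched_couple(number):
-- 	if number < 10: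
-- 		return False
-- 	digits = []
-- 	while number > 0:
-- 		digits.append(number % 10)
-- 		number //= 10
-- 	return any((a + b) % 2 == 1 for a, b in zip(digits, digits[1:]))
-- ===== Notes on version B (the rewrite author's own statement) =====
-- stated objective: alternative
-- what changed: Replaces the recursion that re-tests each pair of adjacent digits in place with an iterative pass that first collects the digit list and then scans adjacent pairs for an odd parity sum.
import Mathlib
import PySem

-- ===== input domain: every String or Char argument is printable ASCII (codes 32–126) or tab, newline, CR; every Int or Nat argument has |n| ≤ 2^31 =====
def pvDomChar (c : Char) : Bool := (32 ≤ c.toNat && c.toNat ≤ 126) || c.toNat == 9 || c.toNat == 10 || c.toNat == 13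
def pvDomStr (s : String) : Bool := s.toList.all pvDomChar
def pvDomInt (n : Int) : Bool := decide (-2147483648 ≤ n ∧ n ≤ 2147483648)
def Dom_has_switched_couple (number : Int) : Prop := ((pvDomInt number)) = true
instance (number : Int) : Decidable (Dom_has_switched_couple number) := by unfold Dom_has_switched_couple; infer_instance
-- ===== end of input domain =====

-- B collects the digit list iteratively and then scans adjacent pairs, instead of A's recursion; same cost, different decomposition.

-- ===== PORT A =====
def has_switched_couple (number : Int) : Bool :=
  if number < 10 then false
  else
    let dig0 := PySem.Int.mod number 10
    let dig1 := PySem.Int.mod (PySem.Int.floordiv number 10) 10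
    if (PySem.Int.mod dig0 2 == 0 && !(PySem.Int.mod dig1 2 == 0)) ||
       (!(PySem.Int.mod dig0 2 == 0) && PySem.Int.mod dig1 2 == 0) then true
    else has_switched_couple (PySem.Int.floordiv number 10)
termination_by number.toNat
decreasing_by
  have h10 : (0:Int) < 10 := by norm_num
  rw [PySem.Int.floordiv_eq_ediv_of_pos h10]
  omega

-- ===== PORT B =====
-- the `while number > 0` loop of Source B, carrying the accumulated digit list
def pvDigitLoop (number : Int) (digits : List Int) : List Int :=
  if 0 < number then
    pvDigitLoop (PySem.Int.floordiv number 10) (digits ++ [PySem.Int.mod number 10])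
  else digits
termination_by number.toNat
decreasing_by
  have h10 : (0:Int) < 10 := by norm_num
  rw [PySem.Int.floordiv_eq_ediv_of_pos h10]
  omega

def has_switched_couple_alt (number : Int) : Bool :=
  if number < 10 then false
  else
    let digits := pvDigitLoop number []
    -- zip(digits, digits[1:]) with the any(...) generator; digits[1:] = digits.tail
    (digits.zip digits.tail).any (fun p => PySem.Int.mod (p.1 + p.2) 2 == 1)

-- ===== PRECONDITION & SPEC =====
def Spec_has_switched_couple (number : Int) (out : Bool) : Prop := out = has_switched_couple_alt number
instance (number : Int) (out : Bool) : Decidable (Spec_has_switched_couple number out) := by unfold Spec_has_switched_couple; infer_instance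

-- ===== CLAIM (what is proved, stated in full; the proofs are below) =====
def Claim_equal_has_switched_couple : Prop := ∀ (number : Int), Dom_has_switched_couple number → Spec_has_switched_couple number (has_switched_couple number)

-- ===== LEMMAS AND PROOFS =====

theorem pvDigitLoop_stop (n : Int) (acc : List Int) (h : ¬ 0 < n) : pvDigitLoop n acc = acc := by
  rw [pvDigitLoop]; simp [h]

theorem pvDigitLoop_step (n : Int) (acc : List Int) (h : 0 < n) :
    pvDigitLoop n acc = pvDigitLoop (PySem.Int.floordiv n 10) (acc ++ [PySem.Int.mod n 10]) := by
  rw [pvDigitLoop]; simp [h]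

-- accumulator lemma for the digit loop
theorem pvDigitLoop_acc (k : Nat) : ∀ (n : Int), n.toNat ≤ k → ∀ acc : List Int,
    pvDigitLoop n acc = acc ++ pvDigitLoop n [] := by
  induction k with
  | zero =>
    intro n hn acc
    have h : ¬ 0 < n := by omega
    rw [pvDigitLoop_stop n acc h, pvDigitLoop_stop n [] h]
    simp
  | succ k ih =>
    intro n hn acc
    by_cases h : 0 < n
    · have h10 : (0:Int) < 10 := by norm_num
      have hlt : (PySem.Int.floordiv n 10).toNat ≤ k := by
        rw [PySem.Int.floordiv_eq_ediv_of_pos h10]; omega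
      rw [pvDigitLoop_step n acc h, pvDigitLoop_step n [] h,
          ih _ hlt (acc ++ [PySem.Int.mod n 10]), ih _ hlt ([] ++ [PySem.Int.mod n 10])]
      simp
    · rw [pvDigitLoop_stop n acc h, pvDigitLoop_stop n [] h]
      simp

theorem pvDigitLoop_cons (n : Int) (h : 0 < n) :
    pvDigitLoop n [] = PySem.Int.mod n 10 :: pvDigitLoop (PySem.Int.floordiv n 10) [] := by
  rw [pvDigitLoop_step n [] h,
      pvDigitLoop_acc (PySem.Int.floordiv n 10).toNat _ le_rfl]
  simp

-- A's disjunctive parity test equals B's odd-sum test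
theorem pvParity_eq (a b : Int) :
    ((PySem.Int.mod a 2 == 0 && !(PySem.Int.mod b 2 == 0)) ||
     (!(PySem.Int.mod a 2 == 0) && PySem.Int.mod b 2 == 0))
    = (PySem.Int.mod (a + b) 2 == 1) := by
  have h2 : (0:Int) < 2 := by norm_num
  simp only [PySem.Int.mod_eq_emod_of_pos h2]
  rcases Int.emod_two_eq a with ha | ha <;> rcases Int.emod_two_eq b with hb | hb <;>
    rw [Int.add_emod, ha, hb] <;> simp

def pvAnyPairs (l : List Int) : Bool :=
  (l.zip l.tail).any (fun p => PySem.Int.mod (p.1 + p.2) 2 == 1)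

theorem pvAnyPairs_cons (a b : Int) (t : List Int) :
    pvAnyPairs (a :: b :: t) = ((PySem.Int.mod (a + b) 2 == 1) || pvAnyPairs (b :: t)) := by
  simp only [pvAnyPairs, List.tail_cons, List.zip_cons_cons, List.any_cons]

-- the adjacent-pair scan over the digit list of n agrees with B for every n ≥ 1
theorem pvAnyPairs_digits (n : Int) (h1 : 1 ≤ n) :
    pvAnyPairs (pvDigitLoop n []) = has_switched_couple_alt n := by
  by_cases h : n < 10
  · have h10 : (0:Int) < 10 := by norm_num
    have hz : ¬ 0 < PySem.Int.floordiv n 10 := by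
      rw [PySem.Int.floordiv_eq_ediv_of_pos h10]; omega
    rw [pvDigitLoop_cons n (by omega), pvDigitLoop_stop _ _ hz,
        has_switched_couple_alt, if_pos h]
    simp [pvAnyPairs]
  · rw [has_switched_couple_alt, if_neg h]; rfl

theorem pvMain (k : Nat) : ∀ (n : Int), n.toNat ≤ k →
    has_switched_couple n = has_switched_couple_alt n := by
  induction k with
  | zero =>
    intro n hn
    have h : n < 10 := by omega
    rw [has_switched_couple, has_switched_couple_alt]
    simp [h]
  | succ k ih =>
    intro n hn
    by_cases h : n < 10
    · rw [has_switched_couple, has_switched_couple_alt]; simp [h]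
    · have h10 : (0:Int) < 10 := by norm_num
      have hq1 : 1 ≤ PySem.Int.floordiv n 10 := by
        rw [PySem.Int.floordiv_eq_ediv_of_pos h10]; omega
      have hqk : (PySem.Int.floordiv n 10).toNat ≤ k := by
        rw [PySem.Int.floordiv_eq_ediv_of_pos h10]; omega
      have hd2 : pvDigitLoop (PySem.Int.floordiv n 10) []
          = PySem.Int.mod (PySem.Int.floordiv n 10) 10 ::
              pvDigitLoop (PySem.Int.floordiv (PySem.Int.floordiv n 10) 10) [] :=
        pvDigitLoop_cons _ (by omega)
      have hA : has_switched_couple n =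
          (if ((PySem.Int.mod (PySem.Int.mod n 10) 2 == 0 &&
                !(PySem.Int.mod (PySem.Int.mod (PySem.Int.floordiv n 10) 10) 2 == 0)) ||
               (!(PySem.Int.mod (PySem.Int.mod n 10) 2 == 0) &&
                PySem.Int.mod (PySem.Int.mod (PySem.Int.floordiv n 10) 10) 2 == 0))
           then true else has_switched_couple (PySem.Int.floordiv n 10)) := by
        rw [has_switched_couple, if_neg h]
      have hB : has_switched_couple_alt n =
          ((PySem.Int.mod (PySem.Int.mod n 10 + PySem.Int.mod (PySem.Int.floordiv n 10) 10) 2 == 1) ||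
           has_switched_couple_alt (PySem.Int.floordiv n 10)) := by
        rw [has_switched_couple_alt, if_neg h]
        show pvAnyPairs (pvDigitLoop n []) = _
        rw [pvDigitLoop_cons n (by omega), hd2, pvAnyPairs_cons, ← hd2,
            pvAnyPairs_digits _ hq1]
      rw [hA, hB, ← pvParity_eq, ih _ hqk]
      cases hC : ((PySem.Int.mod (PySem.Int.mod n 10) 2 == 0 &&
                !(PySem.Int.mod (PySem.Int.mod (PySem.Int.floordiv n 10) 10) 2 == 0)) ||
               (!(PySem.Int.mod (PySem.Int.mod n 10) 2 == 0) &&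
                PySem.Int.mod (PySem.Int.mod (PySem.Int.floordiv n 10) 10) 2 == 0)) <;>
        simp

-- ===== VERDICT (by name: the statement is the Claim_ definition above) =====
theorem has_switched_couple_spec : Claim_equal_has_switched_couple := by
  intro number _
  unfold Spec_has_switched_couple
  exact pvMain number.toNat number le_rfl
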